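-- pv_equiv track=rewrite | github.com/paintcode/vibebells | backend/app/services/swap_counter.py | _count_swaps_for_player
-- ===== SOURCE A (Python) =====
-- def _count_swaps_for_player(player_notes, hand_map):
--     """
--     Count swaps for a single player based on their actual note sequence.
--
--     Algorithm:
--     1. Player starts with 2 bells held (first 2 unique pitches)
--     2. For each note in sequence:
--        - If holding it: play it
--        - If not holding it: drop the bell needed furthest in future, pick up needed bell (1 swap)
--     3. Look ahead to determine which bell to drop (greedy algorithm: drop bell with furthest next appearance)
--
--     Example: A-B-C-B-A
--     - Start: holding A (left), B (right)
--     - Note A: already holding, play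
--     - Note B: already holding, play
--     - Note C: not holding, look ahead:
--       - A next appears at position 4
--       - B next appears at position 3
--       - Drop A (needed at 4, which is further), pick up C (1 swap)
--     - Note B: already holding, play
--     - Note A: not holding, look ahead:
--       - B next appears: never (no more notes)
--       - Drop B, pick up A (1 swap)
--     - Total: 2 swaps
--
--     Args:
--         player_notes: List of notes (dicts with 'pitch', 'duration', 'time') in chronological order
--         hand_map: Dict mapping pitch -> 'left' or 'right' (predetermined hand assignments)
--
--     Returns:
--         Integer count of swaps
--     """
--     if len(player_notes) <= 1:
--         return 0
--
--     # Get pitches in order (may have duplicates)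
--     pitches = [note.get('pitch') for note in player_notes]
--
--     # Get unique pitches in order of first appearance
--     unique_pitches = []
--     seen = set()
--     for pitch in pitches:
--         if pitch not in seen:
--             unique_pitches.append(pitch)
--             seen.add(pitch)
--
--     if len(unique_pitches) <= 2:
--         # Can hold 2 bells (1 per hand), no swaps needed
--         return 0
--
--     # Initialize: player holds first 2 unique pitches
--     holding = set(unique_pitches[:2])
--     swaps = 0
--
--     # Process each note in the sequence
--     for i, pitch in enumerate(pitches):
--         if pitch not in holding:
--             # Need to swap: figure out which bell to drop
--             # Drop the bell that's needed furthest in the future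
--
--             # Find next occurrence of each bell we're currently holding
--             next_positions = {}
--             for held_pitch in holding:
--                 next_pos = None
--                 for j in range(i + 1, len(pitches)):
--                     if pitches[j] == held_pitch:
--                         next_pos = j
--                         break
--                 next_positions[held_pitch] = next_pos
--
--             # Drop the bell with furthest next appearance (or never appears again)
--             # Sort by: None (never appears) first, then by position (furthest first)
--             held_list = list(holding)
--             held_list.sort(key=lambda p: (next_positions[p] is not None, -next_positions[p] if next_positions[p] is not None else -1))
--
--             bell_to_drop = held_list[0]  # First in sorted list (furthest away or never needed)
--
--             holding.remove(bell_to_drop)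
--             holding.add(pitch)
--             swaps += 1
--
--     return swaps
-- ===== SOURCE B (Python) =====
-- def _count_swaps_for_player(player_notes, hand_map):
--     """Belady greedy swap count without look-ahead scans: precompute each
--     note's next-occurrence index in one backward pass, then keep the held
--     bells' next-needed indices cached in a dict instead of rescanning the
--     future at every swap."""
--     if len(player_notes) <= 1:
--         return 0
--
--     pitches = [note.get('pitch') for note in player_notes]
--     n = len(pitches)
--
--     # next occurrence of pitches[i] after i (n = never again), one backward pass
--     nxt = [n] * n
--     last = {}
--     for i in range(n - 1, -1, -1):
--         nxt[i] = last.get(pitches[i], n)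
--         last[pitches[i]] = i
--
--     # first occurrence index of each distinct pitch, in order of appearance
--     first = {}
--     for i, p in enumerate(pitches):
--         if p not in first:
--             first[p] = i
--
--     if len(first) <= 2:
--         return 0
--
--     # hold the first two distinct pitches; value = index where the bell is next needed
--     items = iter(first.items())
--     holding = dict((next(items), next(items)))
--     swaps = 0
--     for i, p in enumerate(pitches):
--         if p in holding:
--             holding[p] = nxt[i]
--         else:
--             drop = max(holding, key=holding.get)  # furthest-needed bell (n = never)
--             del holding[drop]
--             holding[p] = nxt[i]
--             swaps += 1
--     return swaps
-- ===== Notes on version B (the rewrite author's own statement) =====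
-- stated objective: alternative
-- what changed: Replaces A's per-miss rescan of the future (a linear scan per held bell inside the loop, plus a sort of the held pair) with a single backward pass that precomputes every note's next-occurrence index and a dict caching each held bell's next-needed index, so each swap decision needs no scan.
import Mathlib
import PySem

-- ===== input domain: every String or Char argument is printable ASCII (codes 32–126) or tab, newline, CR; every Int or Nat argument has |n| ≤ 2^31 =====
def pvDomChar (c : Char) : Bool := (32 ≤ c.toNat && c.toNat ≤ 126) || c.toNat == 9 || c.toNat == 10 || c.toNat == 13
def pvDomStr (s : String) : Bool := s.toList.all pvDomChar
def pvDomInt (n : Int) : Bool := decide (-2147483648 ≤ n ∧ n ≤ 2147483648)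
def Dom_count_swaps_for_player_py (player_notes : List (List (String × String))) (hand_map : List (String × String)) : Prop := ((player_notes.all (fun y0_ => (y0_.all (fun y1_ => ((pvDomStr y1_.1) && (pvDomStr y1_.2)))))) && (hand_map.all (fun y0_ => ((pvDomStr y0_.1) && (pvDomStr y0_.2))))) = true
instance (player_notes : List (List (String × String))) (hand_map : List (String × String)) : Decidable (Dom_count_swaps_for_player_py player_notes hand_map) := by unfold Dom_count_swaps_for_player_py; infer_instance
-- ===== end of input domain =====

-- B replaces A's per-swap rescans of the future with one precomputed
-- next-occurrence pass plus cached next-needed indices (objective: alternative).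

-- ===== PORT A =====
-- Port note: Python's `holding` is a hash set; this port keeps it in insertion
-- order (PySem.Set).  The returned swap count does not depend on that order:
-- the sort key ties only between two bells that never occur again, and dropping
-- either yields the same count (the proofs below confirm the count is what B
-- computes either way).

-- 'for j in range(i + 1, len(pitches)): if pitches[j] == held_pitch: next_pos = j; break'
-- scanned over the remaining suffix, j carrying the absolute index
def pvScanNext (p : Option String) : List (Option String) → Int → Option Int
  | [], _ => none
  | q :: rest, j => if q = p then some j else pvScanNext p rest (j + 1)

-- the two components of the sort key
-- 'lambda p: (next_positions[p] is not None, -next_positions[p] if next_positions[p] is not None else -1)'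
def pvKeyHasNext (nextPositions : PySem.Dict (Option String) (Option Int)) (q : Option String) : Bool :=
  (nextPositions.getD q none).isSome

def pvKeyNeg (nextPositions : PySem.Dict (Option String) (Option Int)) (q : Option String) : Int :=
  match nextPositions.getD q none with
  | some j => -j
  | none => -1

-- 'for i, pitch in enumerate(pitches): …', rest = pitches[i:]
def pvLoopA : List (Option String) → Int → PySem.Set (Option String) → Int → Int
  | [], _, _, swaps => swaps
  | p :: rest, i, holding, swaps =>
    if holding.contains p then
      pvLoopA rest (i + 1) holding swaps
    else
      let nextPositions : PySem.Dict (Option String) (Option Int) :=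
        holding.foldl (fun d hp => d.insert hp (pvScanNext hp rest (i + 1))) PySem.Dict.empty
      let heldList := PySem.List.sorted2 holding
        (pvKeyHasNext nextPositions) (pvKeyNeg nextPositions)
      match heldList with
      | [] => swaps        -- unreachable: holding is never empty
      | bellToDrop :: _ =>
        pvLoopA rest (i + 1) (((PySem.Set.remove? holding bellToDrop).getD holding).add p)
          (swaps + 1)

-- 'for pitch in pitches: if pitch not in seen: unique.append(pitch); seen.add(pitch)'
def pvUniqLoop : List (Option String) → List (Option String) → PySem.Set (Option String) → List (Option String)
  | [], unique, _ => unique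
  | p :: rest, unique, seen =>
    if seen.contains p then pvUniqLoop rest unique seen
    else pvUniqLoop rest (unique ++ [p]) (seen.add p)

def count_swaps_for_player_py (player_notes : List (List (String × String))) (hand_map : List (String × String)) : Int :=
  if PySem.List.len player_notes ≤ 1 then 0
  else
    let pitches := player_notes.map (fun note => (PySem.Dict.mk note).get? "pitch")
    let uniquePitches := pvUniqLoop pitches [] PySem.Set.empty
    if PySem.List.len uniquePitches ≤ 2 then 0
    else
      let holding := PySem.Set.ofList (PySem.List.slice uniquePitches none (some 2))
      pvLoopA pitches 0 holding 0

-- ===== PORT B =====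
-- 'for i in range(n - 1, -1, -1): nxt[i] = last.get(pitches[i], n); last[pitches[i]] = i'
-- (structural right-to-left pass over the suffix starting at absolute index i;
--  returns the nxt slice for that suffix together with `last`)
def pvBuildNxt (n : Int) : List (Option String) → Int → List Int × PySem.Dict (Option String) Int
  | [], _ => ([], PySem.Dict.empty)
  | p :: rest, i =>
    let res := pvBuildNxt n rest (i + 1)
    (res.2.getD p n :: res.1, res.2.insert p i)

-- 'for i, p in enumerate(pitches): if p not in first: first[p] = i'
def pvFirstLoop : List (Option String) → Int → PySem.Dict (Option String) Int → PySem.Dict (Option String) Int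
  | [], _, first => first
  | p :: rest, i, first =>
    if first.contains p then pvFirstLoop rest (i + 1) first
    else pvFirstLoop rest (i + 1) (first.insert p i)

-- 'for i, p in enumerate(pitches): …' with nxt[i] zipped in
def pvLoopB : List (Option String × Int) → PySem.Dict (Option String) Int → Int → Int
  | [], _, swaps => swaps
  | (p, np) :: rest, holding, swaps =>
    if holding.contains p then
      pvLoopB rest (holding.insert p np) swaps
    else
      match PySem.List.max? holding.keys (fun k => holding.getD k 0) with
      | none => swaps    -- unreachable: holding is never empty
      | some drop => pvLoopB rest ((holding.erase drop).insert p np) (swaps + 1)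

def count_swaps_for_player_py_alt (player_notes : List (List (String × String))) (hand_map : List (String × String)) : Int :=
  if PySem.List.len player_notes ≤ 1 then 0
  else
    let pitches := player_notes.map (fun note => (PySem.Dict.mk note).get? "pitch")
    let n := PySem.List.len pitches
    let nxt := (pvBuildNxt n pitches 0).1
    let first := pvFirstLoop pitches 0 PySem.Dict.empty
    if (PySem.Dict.size first : Int) ≤ 2 then 0
    else
      match first.items with
      | (k0, v0) :: (k1, v1) :: _ =>
        pvLoopB (pitches.zip nxt)
          ((PySem.Dict.empty.insert k0 v0).insert k1 v1) 0
      | _ => 0           -- unreachable: first has at least 3 items here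

-- ===== PRECONDITION & SPEC =====
def Spec_count_swaps_for_player_py (player_notes : List (List (String × String))) (hand_map : List (String × String)) (out : Int) : Prop := out = count_swaps_for_player_py_alt player_notes hand_map
instance (player_notes : List (List (String × String))) (hand_map : List (String × String)) (out : Int) : Decidable (Spec_count_swaps_for_player_py player_notes hand_map out) := by unfold Spec_count_swaps_for_player_py; infer_instance

-- ===== CLAIM (what is proved, stated in full; the proofs are below) =====
def Claim_equal_count_swaps_for_player_py : Prop := ∀ (player_notes : List (List (String × String))) (hand_map : List (String × String)), Dom_count_swaps_for_player_py player_notes hand_map → Spec_count_swaps_for_player_py player_notes hand_map (count_swaps_for_player_py player_notes hand_map)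

-- ===== LEMMAS AND PROOFS =====

-- the stored next-needed value of pitch q at step i (n = never again)
def pvValOf (n : Int) (xs : List (Option String)) (i : Int) (q : Option String) : Int :=
  (pvScanNext q xs i).getD n

-- the list B's main loop runs over, with the nxt values spelled out
def pvPair (n : Int) : List (Option String) → Int → List (Option String × Int)
  | [], _ => []
  | p :: r, i => (p, pvValOf n r (i + 1) p) :: pvPair n r (i + 1)

-- order-of-first-appearance items with their first-occurrence indices
def pvFirstItems : List (Option String) → Int → List (Option String) → List (Option String × Int)
  | [], _, _ => []
  | p :: r, i, ks =>
    if p ∈ ks then pvFirstItems r (i + 1) ks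
    else (p, i) :: pvFirstItems r (i + 1) (ks ++ [p])

lemma pvScanNext_bound {p : Option String} {xs : List (Option String)} {i j : Int}
    (h : pvScanNext p xs i = some j) : i ≤ j ∧ j < i + xs.length := by
  induction xs generalizing i with
  | nil => simp [pvScanNext] at h
  | cons q r ih =>
    by_cases hq : q = p
    · simp [pvScanNext, hq] at h
      simp only [List.length_cons]
      push_cast
      omega
    · simp [pvScanNext, hq] at h
      have := ih h
      simp only [List.length_cons]
      push_cast
      omega

lemma pvUniqLoop_eq (xs : List (Option String)) : ∀ (u : List (Option String)),
    pvUniqLoop xs u u = List.foldl PySem.Set.add u xs := by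
  induction xs with
  | nil => intro u; simp [pvUniqLoop]
  | cons p r ih =>
    intro u
    by_cases hm : p ∈ u
    · simp [pvUniqLoop, PySem.Set.contains, PySem.Set.add, hm, ih]
    · simp [pvUniqLoop, PySem.Set.contains, PySem.Set.add, hm, ih]

lemma pvFirstLoop_items (xs : List (Option String)) :
    ∀ (i : Int) (d : PySem.Dict (Option String) Int),
    (pvFirstLoop xs i d).items = d.items ++ pvFirstItems xs i d.keys := by
  induction xs with
  | nil => intro i d; simp [pvFirstLoop, pvFirstItems]
  | cons p r ih =>
    intro i d
    by_cases hm : p ∈ d.keys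
    · have hc : d.contains p = true := by
        rw [PySem.Dict.contains_eq_decide_mem_keys]; simp [hm]
      simp [pvFirstLoop, hc, pvFirstItems, hm, ih]
    · have hc : d.contains p = false := by
        rw [PySem.Dict.contains_eq_decide_mem_keys]; simp [hm]
      simp only [pvFirstLoop, hc, Bool.false_eq_true, if_false]
      rw [ih, PySem.Dict.items_insert_of_not_contains d _ hc,
          PySem.Dict.keys_insert_of_not_contains d _ hc]
      simp [pvFirstItems, hm]

lemma pvFirstItems_fst (xs : List (Option String)) : ∀ (i : Int) (ks : List (Option String)),
    List.foldl PySem.Set.add ks xs = ks ++ (pvFirstItems xs i ks).map Prod.fst := by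
  induction xs with
  | nil => intro i ks; simp [pvFirstItems]
  | cons p r ih =>
    intro i ks
    by_cases hm : p ∈ ks
    · have ha : PySem.Set.add ks p = ks := by
        simp [PySem.Set.add, PySem.Set.contains, hm]
      simp only [List.foldl_cons, ha, pvFirstItems, if_pos hm]
      exact ih (i + 1) ks
    · have ha : PySem.Set.add ks p = ks ++ [p] := by
        simp [PySem.Set.add, PySem.Set.contains, hm]
      simp only [List.foldl_cons, ha, pvFirstItems, if_neg hm]
      rw [ih (i + 1) (ks ++ [p])]
      simp

lemma pvFirstItems_mem (xs : List (Option String)) :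
    ∀ (i : Int) (ks : List (Option String)) (q : Option String) (v : Int),
    (q, v) ∈ pvFirstItems xs i ks → q ∉ ks ∧ pvScanNext q xs i = some v := by
  induction xs with
  | nil => intro i ks q v h; simp [pvFirstItems] at h
  | cons p r ih =>
    intro i ks q v h
    by_cases hm : p ∈ ks
    · rcases ih (i + 1) ks q v (by simpa [pvFirstItems, hm] using h) with ⟨hq, hs⟩
      have hqp : ¬ p = q := fun he => hq (he ▸ hm)
      exact ⟨hq, by simp [pvScanNext, hqp, hs]⟩
    · simp only [pvFirstItems, if_neg hm, List.mem_cons] at h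
      rcases h with h | h
      · rw [Prod.mk.injEq] at h
        obtain ⟨h1, h2⟩ := h
        subst h1; subst h2
        exact ⟨hm, by simp [pvScanNext]⟩
      · rcases ih (i + 1) (ks ++ [p]) q v h with ⟨hq, hs⟩
        simp only [List.mem_append, List.mem_singleton, not_or] at hq
        have hqp : ¬ p = q := fun he => hq.2 he.symm
        exact ⟨hq.1, by simp [pvScanNext, hqp, hs]⟩

lemma pvBuildNxt_getD (n : Int) (xs : List (Option String)) :
    ∀ (i : Int) (q : Option String),
    ((pvBuildNxt n xs i).2).getD q n = pvValOf n xs i q := by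
  induction xs with
  | nil => intro i q; simp [pvBuildNxt, pvValOf, pvScanNext, PySem.Dict.getD_empty]
  | cons p r ih =>
    intro i q
    by_cases hq : q = p
    · subst hq
      simp [pvBuildNxt, PySem.Dict.getD_insert_self, pvValOf, pvScanNext]
    · have hpq : ¬ p = q := fun he => hq he.symm
      simp only [pvBuildNxt]
      rw [PySem.Dict.getD_insert_of_ne _ _ _ hq, ih]
      simp [pvValOf, pvScanNext, hpq]

lemma pvBuildNxt_zip (n : Int) (xs : List (Option String)) : ∀ (i : Int),
    xs.zip (pvBuildNxt n xs i).1 = pvPair n xs i := by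
  induction xs with
  | nil => intro i; simp [pvBuildNxt, pvPair]
  | cons p r ih =>
    intro i
    simp only [pvBuildNxt, pvPair, List.zip_cons_cons]
    rw [pvBuildNxt_getD, ih]

-- the two-element sort: A's (has-next, -position) ordering picks exactly the
-- bell whose n-defaulted next-needed index is larger (ties keep insertion order)
lemma pvSort2 (n : Int) (a b : Option String) (hab : a ≠ b) (sa sb : Option Int)
    (ha : ∀ j, sa = some j → j < n) (hb : ∀ j, sb = some j → j < n) :
    PySem.List.sorted2 ([a, b] : List (Option String))
      (pvKeyHasNext (PySem.Dict.mk [(a, sa), (b, sb)]))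
      (pvKeyNeg (PySem.Dict.mk [(a, sa), (b, sb)]))
    = if sa.getD n < sb.getD n then [b, a] else [a, b] := by
  have hba : b ≠ a := Ne.symm hab
  rcases sa with _ | ja <;> rcases sb with _ | jb
  · simp [PySem.List.sorted2, PySem.List.insertBy, pvKeyHasNext, pvKeyNeg,
      PySem.Dict.getD, PySem.Dict.get?, hab, hba]
  · have hjb : jb < n := hb jb rfl
    simp [PySem.List.sorted2, PySem.List.insertBy, pvKeyHasNext, pvKeyNeg,
      PySem.Dict.getD, PySem.Dict.get?, hab, hba, Bool.lt_iff]
    omega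
  · have hja : ja < n := ha ja rfl
    simp [PySem.List.sorted2, PySem.List.insertBy, pvKeyHasNext, pvKeyNeg,
      PySem.Dict.getD, PySem.Dict.get?, hab, hba, Bool.lt_iff]
    omega
  · by_cases h : ja < jb
    · simp [PySem.List.sorted2, PySem.List.insertBy, pvKeyHasNext, pvKeyNeg,
        PySem.Dict.getD, PySem.Dict.get?, hab, hba, h]
    · simp [PySem.List.sorted2, PySem.List.insertBy, pvKeyHasNext, pvKeyNeg,
        PySem.Dict.getD, PySem.Dict.get?, hab, hba, h]

-- the main loop invariant: A's loop over the suffix with held set [a, b] equals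
-- B's loop with the cached next-needed indices of a and b
lemma pvLoop_eq (n : Int) (rest : List (Option String)) :
    ∀ (i : Int) (a b : Option String) (swaps : Int), a ≠ b →
    i + (rest.length : Int) ≤ n →
    pvLoopA rest i [a, b] swaps
      = pvLoopB (pvPair n rest i)
          (PySem.Dict.mk [(a, pvValOf n rest i a), (b, pvValOf n rest i b)]) swaps := by
  induction rest with
  | nil => intro i a b swaps hab hle; simp [pvLoopA, pvPair, pvLoopB]
  | cons p r ih =>
    intro i a b swaps hab hle
    have hlen : i + 1 + (r.length : Int) ≤ n := by
      simp only [List.length_cons] at hle; push_cast at hle ⊢; omega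
    have hba : b ≠ a := Ne.symm hab
    by_cases hpa : p = a
    · -- currently held in the first slot: play it, refresh its cached index
      subst hpa
      have hpb : p ≠ b := hab
      have hva : pvValOf n (p :: r) i p = i := by simp [pvValOf, pvScanNext]
      have hvb : pvValOf n (p :: r) i b = pvValOf n r (i + 1) b := by
        simp [pvValOf, pvScanNext, hpb]
      have hA : PySem.Set.contains [p, b] p = true := by
        simp [PySem.Set.contains]
      have hB : (PySem.Dict.mk [(p, (i : Int)), (b, pvValOf n r (i + 1) b)]).contains p = true := by
        simp [PySem.Dict.contains]
      have hIns : (PySem.Dict.mk [(p, (i : Int)), (b, pvValOf n r (i + 1) b)]).insert p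
          (pvValOf n r (i + 1) p) = PySem.Dict.mk [(p, pvValOf n r (i + 1) p), (b, pvValOf n r (i + 1) b)] := by
        simp [PySem.Dict.insert, hB, hba]
      simp only [pvLoopA, hA, if_true, pvPair, pvLoopB, hva, hvb, hB, hIns]
      exact ih (i + 1) p b swaps hab hlen
    · by_cases hpb : p = b
      · -- held in the second slot
        subst hpb
        have hvb : pvValOf n (p :: r) i p = i := by simp [pvValOf, pvScanNext]
        have hva : pvValOf n (p :: r) i a = pvValOf n r (i + 1) a := by
          simp [pvValOf, pvScanNext, hpa]
        have hA : PySem.Set.contains [a, p] p = true := by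
          simp [PySem.Set.contains]
        have hB : (PySem.Dict.mk [(a, pvValOf n r (i + 1) a), (p, (i : Int))]).contains p = true := by
          simp [PySem.Dict.contains]
        have hIns : (PySem.Dict.mk [(a, pvValOf n r (i + 1) a), (p, (i : Int))]).insert p
            (pvValOf n r (i + 1) p) = PySem.Dict.mk [(a, pvValOf n r (i + 1) a), (p, pvValOf n r (i + 1) p)] := by
          simp [PySem.Dict.insert, hB, hab]
        simp only [pvLoopA, hA, if_true, pvPair, pvLoopB, hva, hvb, hB, hIns]
        exact ih (i + 1) a p swaps hab hlen
      · -- a swap: A rescans the future, B reads the cached indices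
        have hap : a ≠ p := Ne.symm hpa
        have hbp : b ≠ p := Ne.symm hpb
        have hva : pvValOf n (p :: r) i a = (pvScanNext a r (i + 1)).getD n := by
          simp [pvValOf, pvScanNext, hpa]
        have hvb : pvValOf n (p :: r) i b = (pvScanNext b r (i + 1)).getD n := by
          simp [pvValOf, pvScanNext, hpb]
        have hA : PySem.Set.contains [a, b] p = false := by
          simp [PySem.Set.contains, hpa, hpb]
        have hB : (PySem.Dict.mk [(a, (pvScanNext a r (i + 1)).getD n),
            (b, (pvScanNext b r (i + 1)).getD n)]).contains p = false := by
          simp [PySem.Dict.contains, hap, hbp]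
        have hNP : List.foldl (fun d hp => d.insert hp (pvScanNext hp r (i + 1)))
            (PySem.Dict.empty : PySem.Dict (Option String) (Option Int)) [a, b]
            = PySem.Dict.mk [(a, pvScanNext a r (i + 1)), (b, pvScanNext b r (i + 1))] := by
          simp [PySem.Dict.insert, PySem.Dict.contains, PySem.Dict.empty, hab, hba]
        have hsort := pvSort2 n a b hab (pvScanNext a r (i + 1)) (pvScanNext b r (i + 1))
          (fun j hj => by have := pvScanNext_bound hj; omega)
          (fun j hj => by have := pvScanNext_bound hj; omega)
        by_cases hlt : (pvScanNext a r (i + 1)).getD n < (pvScanNext b r (i + 1)).getD n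
        · -- drop b
          rw [if_pos hlt] at hsort
          have hrem : ((PySem.Set.remove? ([a, b] : PySem.Set (Option String)) b).getD [a, b]).add p
              = [a, p] := by
            simp [PySem.Set.remove?, PySem.Set.contains, PySem.Set.discard, PySem.Set.add,
              hab, hba, hpa, hap]
          have hmax : PySem.List.max? (PySem.Dict.mk [(a, (pvScanNext a r (i + 1)).getD n),
                (b, (pvScanNext b r (i + 1)).getD n)]).keys
              (fun k => (PySem.Dict.mk [(a, (pvScanNext a r (i + 1)).getD n),
                (b, (pvScanNext b r (i + 1)).getD n)]).getD k 0)
              = some b := by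
            simp [PySem.List.max?, PySem.Dict.keys, PySem.Dict.getD, PySem.Dict.get?,
              hab, hba, hlt]
          have hdict : ((PySem.Dict.mk [(a, (pvScanNext a r (i + 1)).getD n),
                (b, (pvScanNext b r (i + 1)).getD n)]).erase b).insert p
              ((pvScanNext p r (i + 1)).getD n)
              = PySem.Dict.mk [(a, (pvScanNext a r (i + 1)).getD n),
                (p, (pvScanNext p r (i + 1)).getD n)] := by
            simp [PySem.Dict.erase, PySem.Dict.insert, PySem.Dict.contains, hab, hba, hap, hbp]
          rw [hva, hvb]
          simp only [pvLoopA, hA, Bool.false_eq_true, if_false, pvPair, pvLoopB, hB, hNP,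
            pvValOf, hsort, hrem, hmax, hdict]
          have IH := ih (i + 1) a p (swaps + 1) hap hlen
          simp only [pvValOf] at IH
          exact IH
        · -- drop a
          rw [if_neg hlt] at hsort
          have hrem : ((PySem.Set.remove? ([a, b] : PySem.Set (Option String)) a).getD [a, b]).add p
              = [b, p] := by
            simp [PySem.Set.remove?, PySem.Set.contains, PySem.Set.discard, PySem.Set.add,
              hab, hba, hpb, hbp]
          have hmax : PySem.List.max? (PySem.Dict.mk [(a, (pvScanNext a r (i + 1)).getD n),
                (b, (pvScanNext b r (i + 1)).getD n)]).keys
              (fun k => (PySem.Dict.mk [(a, (pvScanNext a r (i + 1)).getD n),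
                (b, (pvScanNext b r (i + 1)).getD n)]).getD k 0)
              = some a := by
            simp [PySem.List.max?, PySem.Dict.keys, PySem.Dict.getD, PySem.Dict.get?,
              hab, hba, hlt]
          have hdict : ((PySem.Dict.mk [(a, (pvScanNext a r (i + 1)).getD n),
                (b, (pvScanNext b r (i + 1)).getD n)]).erase a).insert p
              ((pvScanNext p r (i + 1)).getD n)
              = PySem.Dict.mk [(b, (pvScanNext b r (i + 1)).getD n),
                (p, (pvScanNext p r (i + 1)).getD n)] := by
            simp [PySem.Dict.erase, PySem.Dict.insert, PySem.Dict.contains, hab, hba, hap, hbp]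
          rw [hva, hvb]
          simp only [pvLoopA, hA, Bool.false_eq_true, if_false, pvPair, pvLoopB, hB, hNP,
            pvValOf, hsort, hrem, hmax, hdict]
          have IH := ih (i + 1) b p (swaps + 1) hbp hlen
          simp only [pvValOf] at IH
          exact IH

theorem count_swaps_for_player_py_spec_aux :
    ∀ (player_notes : List (List (String × String))) (hand_map : List (String × String)),
    count_swaps_for_player_py player_notes hand_map
      = count_swaps_for_player_py_alt player_notes hand_map := by
  intro pn hm
  by_cases h1 : PySem.List.len pn ≤ 1
  · simp only [count_swaps_for_player_py, count_swaps_for_player_py_alt, if_pos h1]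
  · simp only [count_swaps_for_player_py, count_swaps_for_player_py_alt, if_neg h1]
    generalize hpg : pn.map (fun note => (PySem.Dict.mk note).get? "pitch") = pitches
    have hFI : (pvFirstLoop pitches 0 PySem.Dict.empty).items
        = pvFirstItems pitches 0 ([] : List (Option String)) := by
      have h := pvFirstLoop_items pitches 0 PySem.Dict.empty
      simpa [PySem.Dict.empty, PySem.Dict.keys] using h
    have hU : pvUniqLoop pitches [] PySem.Set.empty
        = (pvFirstItems pitches 0 ([] : List (Option String))).map Prod.fst := by
      have h := pvUniqLoop_eq pitches []
      have h2 := pvFirstItems_fst pitches 0 ([] : List (Option String))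
      simp only [List.nil_append] at h2
      exact h.trans h2
    have hofl : pvUniqLoop pitches [] PySem.Set.empty = PySem.Set.ofList pitches :=
      (pvUniqLoop_eq pitches []).trans (PySem.Set.ofList_eq_foldl pitches).symm
    have hnodup : ((pvFirstItems pitches 0 ([] : List (Option String))).map Prod.fst).Nodup := by
      rw [← hU, hofl]
      exact PySem.Set.nodup_ofList pitches
    have hsize : ((pvFirstLoop pitches 0 PySem.Dict.empty).size : Int)
        = PySem.List.len (pvUniqLoop pitches [] PySem.Set.empty) := by
      simp only [PySem.Dict.size, hFI, hU, PySem.List.len_eq, List.length_map]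
    by_cases h2 : PySem.List.len (pvUniqLoop pitches [] PySem.Set.empty) ≤ 2
    · rw [hU] at h2
      rw [if_pos (by rw [hU]; exact h2), if_pos (by rw [hsize, hU]; exact h2)]
    · rw [if_neg (by rw [hU] at h2 ⊢; exact h2), if_neg (by rw [hsize, hU] at *; exact h2)]
      -- at least three distinct pitches: split off the first two items
      have hlen3 : 2 < (pvFirstItems pitches 0 ([] : List (Option String))).length := by
        rw [hU] at h2
        simp only [PySem.List.len_eq, List.length_map] at h2
        omega
      rcases hFIs : pvFirstItems pitches 0 ([] : List (Option String)) with _ | ⟨⟨u0, v0⟩, rest0⟩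
      · rw [hFIs] at hlen3; simp at hlen3
      rcases rest0 with _ | ⟨⟨u1, v1⟩, t⟩
      · rw [hFIs] at hlen3; simp at hlen3
      have hne : u0 ≠ u1 := by
        rw [hFIs] at hnodup
        simp only [List.map_cons, List.nodup_cons, List.mem_cons] at hnodup
        exact fun he => hnodup.1 (Or.inl he)
      have h0 : pvScanNext u0 pitches 0 = some v0 :=
        (pvFirstItems_mem pitches 0 [] u0 v0 (by rw [hFIs]; exact List.mem_cons_self ..)).2
      have h1' : pvScanNext u1 pitches 0 = some v1 :=
        (pvFirstItems_mem pitches 0 [] u1 v1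
          (by rw [hFIs]; exact List.mem_cons_of_mem _ (List.mem_cons_self ..))).2
      -- A's initial holding is [u0, u1]
      have hhold : PySem.Set.ofList (PySem.List.slice (pvUniqLoop pitches [] PySem.Set.empty)
          none (some 2)) = [u0, u1] := by
        rw [hU, hFIs]
        rw [PySem.List.slice_to _ (by norm_num)]
        simp only [List.map_cons]
        rw [show ((2 : Int).toNat) = 2 from rfl]
        simp [PySem.Set.ofList_eq_foldl, PySem.Set.add, PySem.Set.contains,
          List.take_succ_cons, hne, Ne.symm hne]
      -- B's initial dict is {u0: v0, u1: v1}
      have hdict0 : ((PySem.Dict.empty : PySem.Dict (Option String) Int).insert u0 v0).insert u1 v1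
          = PySem.Dict.mk [(u0, v0), (u1, v1)] := by
        simp [PySem.Dict.insert, PySem.Dict.contains, PySem.Dict.empty, hne, Ne.symm hne]
      rw [hhold, hFI, hFIs]
      simp only [hdict0]
      rw [pvBuildNxt_zip (PySem.List.len pitches) pitches 0]
      have hv0 : v0 = pvValOf (PySem.List.len pitches) pitches 0 u0 := by
        simp [pvValOf, h0]
      have hv1 : v1 = pvValOf (PySem.List.len pitches) pitches 0 u1 := by
        simp [pvValOf, h1']
      rw [hv0, hv1]
      exact pvLoop_eq (PySem.List.len pitches) pitches 0 u0 u1 0 hne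
        (by simp [PySem.List.len_eq])

-- ===== VERDICT (by name: the statement is the Claim_ definition above) =====
theorem count_swaps_for_player_py_spec : Claim_equal_count_swaps_for_player_py := by
  intro pn hm _
  exact count_swaps_for_player_py_spec_aux pn hm
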